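-- pv_equiv track=rewrite | github.com/bioconda/bioconda-recipes | recipes/xtea/xtea/x_cmp.py | exclude_sites
-- ===== SOURCE A (Python) =====
-- def exclude_sites(m_input, m_exclude, i_extnd):
--     m_new_input={}
--     for chrm in m_input:
--         for pos in m_input[chrm]:
--             if chrm not in m_exclude:
--                 if chrm not in m_new_input:
--                     m_new_input[chrm]={}
--                 m_new_input[chrm][pos]=m_input[chrm][pos]
--             else:
--                 b_hit=False
--                 for tmp_pos in range(pos-i_extnd, pos+i_extnd):
--                     if tmp_pos in m_exclude[chrm]:
--                         b_hit=True
--                         break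
--                 if b_hit==True:
--                     continue
--                 if chrm not in m_new_input:
--                     m_new_input[chrm]={}
--                 m_new_input[chrm][pos]=m_input[chrm][pos]
--     return m_new_input
-- ===== SOURCE B (Python) =====
-- def exclude_sites(m_input, m_exclude, i_extnd):
--     m_new_input = {}
--     for chrm, m_pos in m_input.items():
--         if chrm not in m_exclude:
--             kept = dict(m_pos)
--         else:
--             srt = sorted(m_exclude[chrm])
--             kept = {}
--             for pos, val in m_pos.items():
--                 # window [pos-i_extnd, pos+i_extnd) contains an excluded site?
--                 i = _bisect_left(srt, pos - i_extnd)
--                 if i < len(srt) and srt[i] < pos + i_extnd: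
--                     continue
--                 kept[pos] = val
--         if kept:
--             m_new_input[chrm] = kept
--     return m_new_input
--
-- def _bisect_left(a, x):
--     lo, hi = 0, len(a)
--     while lo < hi:
--         mid = (lo + hi) // 2
--         if a[mid] < x:
--             lo = mid + 1
--         else:
--             hi = mid
--     return lo
-- ===== Notes on version B (the rewrite author's own statement) =====
-- stated objective: faster
-- what changed: B sorts each chromosome's excluded positions once and binary-searches for the first excluded site >= pos - i_extnd instead of A's membership probe of every integer in the +/- i_extnd window.
import Mathlib
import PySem

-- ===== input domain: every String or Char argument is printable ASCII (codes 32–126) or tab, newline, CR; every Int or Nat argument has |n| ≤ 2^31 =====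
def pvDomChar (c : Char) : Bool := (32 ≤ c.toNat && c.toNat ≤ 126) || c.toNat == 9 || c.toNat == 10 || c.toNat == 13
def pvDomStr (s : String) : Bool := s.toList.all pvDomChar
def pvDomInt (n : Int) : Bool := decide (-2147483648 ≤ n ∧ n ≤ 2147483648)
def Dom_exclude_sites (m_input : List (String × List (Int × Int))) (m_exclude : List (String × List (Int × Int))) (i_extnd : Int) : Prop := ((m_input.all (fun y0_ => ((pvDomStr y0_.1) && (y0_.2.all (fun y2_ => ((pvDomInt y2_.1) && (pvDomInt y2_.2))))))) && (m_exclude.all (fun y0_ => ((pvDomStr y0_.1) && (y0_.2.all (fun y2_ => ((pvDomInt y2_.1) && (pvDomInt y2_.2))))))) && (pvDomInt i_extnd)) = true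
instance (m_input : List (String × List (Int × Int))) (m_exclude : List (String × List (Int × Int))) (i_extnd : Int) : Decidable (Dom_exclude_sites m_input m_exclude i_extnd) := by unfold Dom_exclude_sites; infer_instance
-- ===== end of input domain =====

-- ===== PORT A =====
-- B replaces A's per-position scan of the whole +/- i_extnd window with one sort of the
-- excluded positions per chromosome and a binary search per position.
-- Dicts arrive as insertion-ordered association lists (the Python values are dicts, so keys are
-- unique; Pre_ excludes duplicate chromosome keys, which no Python dict can produce).  Inside the
-- loops 'm_input[chrm]' / 'm_input[chrm][pos]' are the pair components being iterated, exact
-- under those unique keys.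
def exclude_sites (m_input : List (String × List (Int × Int))) (m_exclude : List (String × List (Int × Int))) (i_extnd : Int) : List (String × List (Int × Int)) :=
  let m_ex : PySem.Dict String (List (Int × Int)) := PySem.Dict.ofList m_exclude
  let m_new : PySem.Dict String (PySem.Dict Int Int) :=
    m_input.foldl (fun acc ce =>
      ce.2.foldl (fun acc pe =>
        if m_ex.contains ce.1 = false then
          -- if chrm not in m_new_input: m_new_input[chrm]={}; m_new_input[chrm][pos]=...
          acc.modify ce.1 PySem.Dict.empty (fun d => d.insert pe.1 pe.2)
        else
          let b_hit := (PySem.List.pyRange (pe.1 - i_extnd) (pe.1 + i_extnd) 1).any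
            (fun tmp_pos => (m_ex.getD ce.1 []).any (fun q => q.1 == tmp_pos))
          if b_hit then acc
          else acc.modify ce.1 PySem.Dict.empty (fun d => d.insert pe.1 pe.2)) acc)
      PySem.Dict.empty
  m_new.items.map (fun kv => (kv.1, kv.2.items))

-- ===== PORT B =====
-- Source B's hand-written _bisect_left is the textbook bisect_left lo/hi loop, ported as
-- PySem.List.bisectLeft (the same algorithm); sorted(dict) sorts the keys.
def exclude_sites_alt (m_input : List (String × List (Int × Int))) (m_exclude : List (String × List (Int × Int))) (i_extnd : Int) : List (String × List (Int × Int)) :=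
  let m_ex : PySem.Dict String (List (Int × Int)) := PySem.Dict.ofList m_exclude
  m_input.foldl (fun acc ce =>
    let kept : PySem.Dict Int Int :=
      match m_ex.get? ce.1 with
      | none => PySem.Dict.ofList ce.2
      | some ex =>
        let srt := PySem.List.sorted (ex.map Prod.fst) (fun x => x) false
        ce.2.foldl (fun k pe =>
          let i := PySem.List.bisectLeft srt (pe.1 - i_extnd)
          -- 'if i < len(srt) and srt[i] < pos + i_extnd: continue'  (srt[i] guarded by i < len)
          if i < srt.length && decide (srt.getD i 0 < pe.1 + i_extnd) then k
          else k.insert pe.1 pe.2) PySem.Dict.empty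
    if kept.items.isEmpty then acc else acc ++ [(ce.1, kept.items)]) []

-- ===== PRECONDITION & SPEC =====
-- Pre_ excludes association lists with a duplicated chromosome key in m_input: such lists do not
-- represent any Python dict (dict keys are unique), and A's merge-into-one-entry behaviour there
-- is an artefact of the list encoding.
def Pre_exclude_sites (m_input : List (String × List (Int × Int))) (m_exclude : List (String × List (Int × Int))) (i_extnd : Int) : Prop :=
  (m_input.map Prod.fst).Nodup
instance (m_input : List (String × List (Int × Int))) (m_exclude : List (String × List (Int × Int))) (i_extnd : Int) : Decidable (Pre_exclude_sites m_input m_exclude i_extnd) := by unfold Pre_exclude_sites; infer_instance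
def pvWitness_exclude_sites : (List (String × List (Int × Int))) × (List (String × List (Int × Int))) × Int :=
  ([("chr1", [(100, 1), (5, 2)])], [("chr1", [(4, 0)])], 3)
def Spec_exclude_sites (m_input : List (String × List (Int × Int))) (m_exclude : List (String × List (Int × Int))) (i_extnd : Int) (out : List (String × List (Int × Int))) : Prop := out = exclude_sites_alt m_input m_exclude i_extnd
instance (m_input : List (String × List (Int × Int))) (m_exclude : List (String × List (Int × Int))) (i_extnd : Int) (out : List (String × List (Int × Int))) : Decidable (Spec_exclude_sites m_input m_exclude i_extnd out) := by unfold Spec_exclude_sites; infer_instance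

-- ===== CLAIM (what is proved, stated in full; the proofs are below) =====
def Claim_equal_exclude_sites : Prop := ∀ (m_input : List (String × List (Int × Int))) (m_exclude : List (String × List (Int × Int))) (i_extnd : Int), Dom_exclude_sites m_input m_exclude i_extnd → Pre_exclude_sites m_input m_exclude i_extnd → Spec_exclude_sites m_input m_exclude i_extnd (exclude_sites m_input m_exclude i_extnd)

-- ===== LEMMAS AND PROOFS =====

-- A's window scan and B's binary search decide the same
-- "is some excluded site in [p - e, p + e)?" question.
theorem hit_eq (ex : List (Int × Int)) (p e : Int) :
    ((PySem.List.pyRange (p - e) (p + e) 1).any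
        (fun tmp_pos => ex.any (fun q => q.1 == tmp_pos)))
      = (PySem.List.bisectLeft (PySem.List.sorted (ex.map Prod.fst) (fun x => x) false) (p - e)
            < (PySem.List.sorted (ex.map Prod.fst) (fun x => x) false).length
         && decide ((PySem.List.sorted (ex.map Prod.fst) (fun x => x) false).getD
              (PySem.List.bisectLeft (PySem.List.sorted (ex.map Prod.fst) (fun x => x) false) (p - e)) 0
            < p + e)) := by
  set srt := PySem.List.sorted (ex.map Prod.fst) (fun x => x) false with hsrt
  set i := PySem.List.bisectLeft srt (p - e) with hi
  have hpw : srt.Pairwise (fun a b => a ≤ b) := by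
    simpa using PySem.List.sorted_pairwise (ex.map Prod.fst) (fun x => x)
  obtain ⟨hle, hlt, hge⟩ := PySem.List.bisectLeft_spec srt (p - e) hpw
  have key : (∃ y ∈ srt, p - e ≤ y ∧ y < p + e) ↔ (i < srt.length ∧ srt.getD i 0 < p + e) := by
    constructor
    · rintro ⟨y, hy, hxy, hyh⟩
      obtain ⟨j, hj, rfl⟩ := List.mem_iff_getElem.mp hy
      have hij : i ≤ j := by
        by_contra h
        exact absurd (hlt j hj (by omega)) (by omega)
      have hilen : i < srt.length := by omega
      refine ⟨hilen, ?_⟩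
      rw [List.getD_eq_getElem srt 0 hilen]
      calc srt[i] ≤ srt[j] := PySem.List.sorted_id_getElem_mono (ex.map Prod.fst) hij hj
        _ < p + e := hyh
    · rintro ⟨hilen, hv⟩
      refine ⟨srt[i], List.getElem_mem hilen, hge i hilen le_rfl, ?_⟩
      rwa [List.getD_eq_getElem srt 0 hilen] at hv
  rw [Bool.eq_iff_iff]
  simp only [List.any_eq_true, PySem.List.mem_pyRange_one, beq_iff_eq,
    Bool.and_eq_true, decide_eq_true_eq]
  constructor
  · rintro ⟨t, ⟨h1, h2⟩, q, hq, rfl⟩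
    refine key.mp ⟨q.1, ?_, h1, h2⟩
    rw [hsrt, PySem.List.mem_sorted]
    exact List.mem_map_of_mem hq
  · intro hc
    obtain ⟨y, hy, hxy, hyh⟩ := key.mpr ⟨by exact_mod_cast hc.1, hc.2⟩
    refine ⟨y, ⟨hxy, hyh⟩, ?_⟩
    rw [hsrt, PySem.List.mem_sorted] at hy
    obtain ⟨q, hq, rfl⟩ := List.mem_map.mp hy
    exact ⟨q, hq, rfl⟩

-- dict.modify is "d[k] = f(d.get(k, dflt))", i.e. an insert of that value.
theorem modify_eq_insert {κ ν : Type} [BEq κ] (d : PySem.Dict κ ν) (k : κ) (d0 : ν) (f : ν → ν) :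
    d.modify k d0 f = d.insert k (f (d.getD k d0)) := rfl

-- an insert-only fold never empties the dict
theorem foldl_ins_ne_empty (keep : Int × Int → Bool) (l : List (Int × Int)) (k : PySem.Dict Int Int)
    (hk : k.items.isEmpty = false) :
    ((l.foldl (fun k pe => if keep pe then k else k.insert pe.1 pe.2) k).items.isEmpty) = false := by
  induction l generalizing k with
  | nil => exact hk
  | cons pe l ih =>
    simp only [List.foldl_cons]
    split
    · exact ih k hk
    · apply ih
      rw [PySem.Dict.items_insert]
      split <;> simp_all

-- fold of A's conditional "m_new_input[chrm][pos] = ..." steps, once chrm is present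
theorem foldl_modify_insert (keep : Int × Int → Bool) (chrm : String)
    (l : List (Int × Int)) (d : PySem.Dict String (PySem.Dict Int Int)) (cur : PySem.Dict Int Int) :
    l.foldl (fun acc pe => if keep pe then acc
        else acc.modify chrm PySem.Dict.empty (fun dd => dd.insert pe.1 pe.2)) (d.insert chrm cur)
      = d.insert chrm (l.foldl (fun k pe => if keep pe then k else k.insert pe.1 pe.2) cur) := by
  induction l generalizing cur with
  | nil => rfl
  | cons pe l ih =>
    simp only [List.foldl_cons]
    split
    · exact ih cur
    · rw [show ((d.insert chrm cur).modify chrm PySem.Dict.empty (fun dd => dd.insert pe.1 pe.2))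
            = d.insert chrm (cur.insert pe.1 pe.2) by
          rw [modify_eq_insert, PySem.Dict.getD_insert_self, PySem.Dict.insert_insert_self]]
      exact ih _

-- A's per-chromosome loop: skip the chromosome when nothing is kept, else append one entry
theorem innerA (keep : Int × Int → Bool) (chrm : String) (l : List (Int × Int))
    (d : PySem.Dict String (PySem.Dict Int Int)) (hd : d.contains chrm = false) :
    l.foldl (fun acc pe => if keep pe then acc
        else acc.modify chrm PySem.Dict.empty (fun dd => dd.insert pe.1 pe.2)) d
      = (let kd := l.foldl (fun k pe => if keep pe then k else k.insert pe.1 pe.2) PySem.Dict.empty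
         if kd.items.isEmpty then d else d.insert chrm kd) := by
  induction l with
  | nil => rfl
  | cons pe l ih =>
    simp only [List.foldl_cons]
    by_cases hk : keep pe
    · simpa [hk] using ih
    · simp only [hk, if_false, Bool.false_eq_true]
      rw [modify_eq_insert, PySem.Dict.getD_of_not_contains d _ hd, foldl_modify_insert]
      have hne : ((PySem.Dict.empty.insert pe.1 pe.2 : PySem.Dict Int Int).items.isEmpty) = false := by
        rw [PySem.Dict.items_insert_of_not_contains _ _ (PySem.Dict.contains_empty pe.1)]
        simp
      have := foldl_ins_ne_empty keep l _ hne
      simp [this]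

-- the two top-level folds agree, for any pair of accumulators related by items-projection
theorem main_fold (m_ex : PySem.Dict String (List (Int × Int))) (e : Int) :
    ∀ (mi : List (String × List (Int × Int))) (accA : PySem.Dict String (PySem.Dict Int Int))
      (accB : List (String × List (Int × Int))),
      (∀ c ∈ mi.map Prod.fst, accA.contains c = false) →
      (mi.map Prod.fst).Nodup →
      accB = accA.items.map (fun kv => (kv.1, kv.2.items)) →
      ((mi.foldl (fun acc ce =>
          ce.2.foldl (fun acc pe =>
            if m_ex.contains ce.1 = false then
              acc.modify ce.1 PySem.Dict.empty (fun d => d.insert pe.1 pe.2)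
            else
              let b_hit := (PySem.List.pyRange (pe.1 - e) (pe.1 + e) 1).any
                (fun tmp_pos => (m_ex.getD ce.1 []).any (fun q => q.1 == tmp_pos))
              if b_hit then acc
              else acc.modify ce.1 PySem.Dict.empty (fun d => d.insert pe.1 pe.2)) acc) accA).items.map
        (fun kv => (kv.1, kv.2.items)))
      = mi.foldl (fun acc ce =>
          let kept : PySem.Dict Int Int :=
            match m_ex.get? ce.1 with
            | none => PySem.Dict.ofList ce.2
            | some ex =>
              let srt := PySem.List.sorted (ex.map Prod.fst) (fun x => x) false
              ce.2.foldl (fun k pe =>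
                let i := PySem.List.bisectLeft srt (pe.1 - e)
                if i < srt.length && decide (srt.getD i 0 < pe.1 + e) then k
                else k.insert pe.1 pe.2) PySem.Dict.empty
          if kept.items.isEmpty then acc else acc ++ [(ce.1, kept.items)]) accB := by
  intro mi
  induction mi with
  | nil => intro accA accB _ _ hrel; simpa using hrel.symm
  | cons ce rest ih =>
    intro accA accB habs hnd hrel
    simp only [List.foldl_cons]
    have hceabs : accA.contains ce.1 = false := habs ce.1 (by simp)
    have hndr : (rest.map Prod.fst).Nodup := by simpa using hnd.sublist (by simp)
    have hne : ce.1 ∉ rest.map Prod.fst := by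
      simp only [List.map_cons, List.nodup_cons] at hnd; exact hnd.1
    -- identify the two kept dicts and rewrite A's inner fold through innerA
    by_cases hcon : m_ex.contains ce.1
    · -- excluded chromosome
      obtain ⟨ex, hex⟩ : ∃ ex, m_ex.get? ce.1 = some ex := by
        cases hget : m_ex.get? ce.1 with
        | none => rw [PySem.Dict.get?_eq_none_iff_contains] at hget; simp [hget] at hcon
        | some ex => exact ⟨ex, rfl⟩
      have hgetD : m_ex.getD ce.1 [] = ex := by
        rw [PySem.Dict.getD_eq_get?_getD, hex]; rfl
      set srt := PySem.List.sorted (ex.map Prod.fst) (fun x => x) false with hsrt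
      have hstep : (fun (acc : PySem.Dict String (PySem.Dict Int Int)) (pe : Int × Int) =>
            if m_ex.contains ce.1 = false then
              acc.modify ce.1 PySem.Dict.empty (fun d => d.insert pe.1 pe.2)
            else
              let b_hit := (PySem.List.pyRange (pe.1 - e) (pe.1 + e) 1).any
                (fun tmp_pos => (m_ex.getD ce.1 []).any (fun q => q.1 == tmp_pos))
              if b_hit then acc
              else acc.modify ce.1 PySem.Dict.empty (fun d => d.insert pe.1 pe.2))
          = (fun acc pe =>
              if (PySem.List.bisectLeft srt (pe.1 - e) < srt.length
                  && decide (srt.getD (PySem.List.bisectLeft srt (pe.1 - e)) 0 < pe.1 + e)) then acc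
              else acc.modify ce.1 PySem.Dict.empty (fun dd => dd.insert pe.1 pe.2)) := by
        funext acc pe
        rw [if_neg (by simp [hcon] : ¬ (m_ex.contains ce.1 = false))]
        simp only [hgetD]
        rw [show ((PySem.List.pyRange (pe.1 - e) (pe.1 + e) 1).any
              (fun tmp_pos => ex.any (fun q => q.1 == tmp_pos))) = _ from hit_eq ex pe.1 e, ← hsrt]
      have hkeep : (fun (k : PySem.Dict Int Int) (pe : Int × Int) =>
            if (PySem.List.bisectLeft srt (pe.1 - e) < srt.length
                && decide (srt.getD (PySem.List.bisectLeft srt (pe.1 - e)) 0 < pe.1 + e)) then k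
            else k.insert pe.1 pe.2)
          = (fun k pe =>
              let i := PySem.List.bisectLeft srt (pe.1 - e)
              if i < srt.length && decide (srt.getD i 0 < pe.1 + e) then k
              else k.insert pe.1 pe.2) := rfl
      rw [hstep, innerA _ ce.1 ce.2 accA hceabs]
      simp only [hex]
      rw [← hkeep]
      set kd := ce.2.foldl (fun (k : PySem.Dict Int Int) pe =>
          if (PySem.List.bisectLeft srt (pe.1 - e) < srt.length
              && decide (srt.getD (PySem.List.bisectLeft srt (pe.1 - e)) 0 < pe.1 + e)) then k
          else k.insert pe.1 pe.2) PySem.Dict.empty with hkd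
      by_cases hemp : kd.items.isEmpty
      · rw [if_pos hemp, if_pos hemp]
        exact ih accA accB (fun c hc => habs c (by simp [hc])) hndr hrel
      · rw [if_neg hemp, if_neg hemp]
        apply ih
        · intro c hc
          rw [PySem.Dict.contains_insert]
          have : c ≠ ce.1 := fun h => hne (h ▸ hc)
          simp [this, habs c (by simp [hc])]
        · exact hndr
        · rw [PySem.Dict.items_insert_of_not_contains _ _ hceabs, List.map_append, hrel]
          simp
    · -- chromosome not excluded: everything kept
      have hgetn : m_ex.get? ce.1 = none := (PySem.Dict.get?_eq_none_iff_contains _ _).mpr (by simpa using hcon)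
      have hstep : (fun (acc : PySem.Dict String (PySem.Dict Int Int)) (pe : Int × Int) =>
            if m_ex.contains ce.1 = false then
              acc.modify ce.1 PySem.Dict.empty (fun d => d.insert pe.1 pe.2)
            else
              let b_hit := (PySem.List.pyRange (pe.1 - e) (pe.1 + e) 1).any
                (fun tmp_pos => (m_ex.getD ce.1 []).any (fun q => q.1 == tmp_pos))
              if b_hit then acc
              else acc.modify ce.1 PySem.Dict.empty (fun d => d.insert pe.1 pe.2))
          = (fun acc pe =>
              if (fun (_ : Int × Int) => false) pe then acc
              else acc.modify ce.1 PySem.Dict.empty (fun dd => dd.insert pe.1 pe.2)) := by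
        funext acc pe
        simp [hcon]
      rw [hstep, innerA _ ce.1 ce.2 accA hceabs]
      simp only [hgetn]
      have hof : PySem.Dict.ofList ce.2
          = ce.2.foldl (fun (k : PySem.Dict Int Int) pe =>
              if (fun (_ : Int × Int) => false) pe then k else k.insert pe.1 pe.2) PySem.Dict.empty := by
        simp only [Bool.false_eq_true, if_false]
        rfl
      rw [hof]
      set kd := ce.2.foldl (fun (k : PySem.Dict Int Int) pe =>
          if (fun (_ : Int × Int) => false) pe then k else k.insert pe.1 pe.2) PySem.Dict.empty with hkd
      by_cases hemp : kd.items.isEmpty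
      · rw [if_pos hemp, if_pos hemp]
        exact ih accA accB (fun c hc => habs c (by simp [hc])) hndr hrel
      · rw [if_neg hemp, if_neg hemp]
        apply ih
        · intro c hc
          rw [PySem.Dict.contains_insert]
          have : c ≠ ce.1 := fun h => hne (h ▸ hc)
          simp [this, habs c (by simp [hc])]
        · exact hndr
        · rw [PySem.Dict.items_insert_of_not_contains _ _ hceabs, List.map_append, hrel]
          simp

-- ===== VERDICT (by name: the statement is the Claim_ definition above) =====
theorem exclude_sites_spec : Claim_equal_exclude_sites := by
  intro m_input m_exclude i_extnd _ hpre
  unfold Spec_exclude_sites exclude_sites exclude_sites_alt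
  exact (main_fold (PySem.Dict.ofList m_exclude) i_extnd m_input PySem.Dict.empty []
    (fun c _ => PySem.Dict.contains_empty c) hpre rfl)
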